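-- pv_equiv track=rewrite | github.com/Aasthaengg/IBMdataset | Python_codes/p02609/s933645038.py | popcount
-- ===== SOURCE A (Python) =====
-- def popcount(N):
--     if N == 0:
--         return 0
--     one_count = 0
--     temp = N
--     while temp > 0:
--         one_count += temp%2
--         temp //= 2
--     return 1+popcount(N%one_count)
-- ===== SOURCE B (Python) =====
-- def popcount(N):
--     # number of set bits, computed by accumulator-free recursion on the binary digits
--     def bits(n):
--         return 0 if n == 0 else n % 2 + bits(n // 2)
--     count = 0
--     while N != 0:
--         N %= bits(N)
--         count += 1
--     return count
-- ===== Notes on version B (the rewrite author's own statement) =====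
-- stated objective: simpler
-- what changed: The outer recursion (1 + popcount(N % one_count)) becomes an iterative while-loop with an explicit step counter, and the accumulator-based inner bit-loop becomes a small accumulator-free recursive digit-sum helper.
import Mathlib
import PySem

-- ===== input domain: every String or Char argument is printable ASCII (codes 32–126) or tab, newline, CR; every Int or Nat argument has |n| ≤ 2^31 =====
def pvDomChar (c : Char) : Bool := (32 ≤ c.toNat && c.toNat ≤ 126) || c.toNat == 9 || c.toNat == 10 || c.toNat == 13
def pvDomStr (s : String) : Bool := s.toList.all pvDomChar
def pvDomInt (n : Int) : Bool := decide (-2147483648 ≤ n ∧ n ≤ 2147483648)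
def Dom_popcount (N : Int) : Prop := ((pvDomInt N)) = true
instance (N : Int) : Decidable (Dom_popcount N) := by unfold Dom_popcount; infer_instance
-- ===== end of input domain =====

-- B turns A's outer recursion into an iterative counting loop and A's accumulator bit-loop into an accumulator-free recursive digit sum; equal return values proved on Pre_.

-- termination measure for division by 2: temp //= 2 shrinks temp.toNat when temp > 0
theorem pvHalfLt (temp : Int) (h : temp > 0) : (PySem.Int.floordiv temp 2).toNat < temp.toNat := by
  have h2 := PySem.Int.floordiv_eq_ediv_of_pos (a := temp) (b := 2) (by omega)
  have h3 := Int.ediv_add_emod temp 2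
  have h4 := Int.emod_nonneg temp (by omega : (2:Int) ≠ 0)
  have h5 := Int.emod_lt_of_pos temp (by omega : (0:Int) < 2)
  omega

-- ===== PORT A =====
-- while temp > 0: one_count += temp%2; temp //= 2
def bitLoopA (temp one_count : Int) : Int :=
  if h : temp > 0 then bitLoopA (PySem.Int.floordiv temp 2) (one_count + PySem.Int.mod temp 2)
  else one_count
termination_by temp.toNat
decreasing_by exact pvHalfLt temp h

-- the bit loop strictly increases the accumulator and adds at most temp (used for termination)
theorem bitLoopA_gt (t : Int) (ht : 0 < t) (oc : Int) :
    oc < bitLoopA t oc ∧ bitLoopA t oc ≤ oc + t := by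
  rw [bitLoopA, dif_pos ht]
  have hd := PySem.Int.floordiv_eq_ediv_of_pos (a := t) (b := 2) (by omega)
  have hm := PySem.Int.mod_eq_emod_of_pos (a := t) (b := 2) (by omega)
  have h3 := Int.ediv_add_emod t 2
  have h4 := Int.emod_nonneg t (by omega : (2:Int) ≠ 0)
  have h5 := Int.emod_lt_of_pos t (by omega : (0:Int) < 2)
  by_cases hq : 0 < t / 2
  · have := bitLoopA_gt (PySem.Int.floordiv t 2) (by omega) (oc + PySem.Int.mod t 2)
    rw [hd, hm] at *
    omega
  · have hz : ¬ PySem.Int.floordiv t 2 > 0 := by omega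
    rw [bitLoopA, dif_neg hz, hm]
    omega
termination_by t.toNat
decreasing_by exact pvHalfLt t ht

theorem bitLoopA_nonpos (t : Int) (ht : ¬ t > 0) (oc : Int) : bitLoopA t oc = oc := by
  rw [bitLoopA, dif_neg ht]

-- termination of the outer step: when the bit count is nonzero, N % bitcount shrinks N.toNat
theorem pvModBitsLtA (N : Int) (hz : bitLoopA N 0 ≠ 0) :
    (PySem.Int.mod N (bitLoopA N 0)).toNat < N.toNat := by
  have hNpos : 0 < N := by
    by_contra hle
    exact hz (bitLoopA_nonpos N (by omega) 0)
  have hb := bitLoopA_gt N hNpos 0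
  have h1 := PySem.Int.mod_nonneg (a := N) (b := bitLoopA N 0) (by omega)
  have h2 := PySem.Int.mod_lt (a := N) (b := bitLoopA N 0) (by omega)
  omega

def popcount (N : Int) : Int :=
  if _h0 : N = 0 then 0
  else
    let one_count := bitLoopA N 0
    -- Python raises ZeroDivisionError when one_count = 0 (only for negative N, excluded by Pre_); junk branch to stay total
    if hz : one_count = 0 then 0
    else 1 + popcount (PySem.Int.mod N one_count)
termination_by N.toNat
decreasing_by exact pvModBitsLtA N hz

-- ===== PORT B =====
-- bits(n) = 0 if n == 0 else n % 2 + bits(n // 2)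
-- (for negative n the Python helper never terminates; those inputs are outside Pre_, the guard n > 0 keeps the Lean function total)
def bitsB (n : Int) : Int :=
  if h : n > 0 then PySem.Int.mod n 2 + bitsB (PySem.Int.floordiv n 2)
  else 0
termination_by n.toNat
decreasing_by exact pvHalfLt n h

-- bounds for B's digit sum: positive and at most n (B's own termination argument)
theorem bitsB_pos (n : Int) (hn : 0 < n) : 0 < bitsB n ∧ bitsB n ≤ n := by
  rw [bitsB, dif_pos hn]
  have hd := PySem.Int.floordiv_eq_ediv_of_pos (a := n) (b := 2) (by omega)
  have hm := PySem.Int.mod_eq_emod_of_pos (a := n) (b := 2) (by omega)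
  have h3 := Int.ediv_add_emod n 2
  have h4 := Int.emod_nonneg n (by omega : (2:Int) ≠ 0)
  have h5 := Int.emod_lt_of_pos n (by omega : (0:Int) < 2)
  by_cases hq : 0 < n / 2
  · have := bitsB_pos (PySem.Int.floordiv n 2) (by omega)
    rw [hd] at *
    rw [hm]
    omega
  · have hz : ¬ PySem.Int.floordiv n 2 > 0 := by omega
    rw [bitsB, dif_neg hz, hm]
    omega
termination_by n.toNat
decreasing_by exact pvHalfLt n hn

theorem pvModBitsLtB (N : Int) (h0 : N ≠ 0) (hz : bitsB N ≠ 0) :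
    (PySem.Int.mod N (bitsB N)).toNat < N.toNat := by
  by_cases hNpos : 0 < N
  · have hb := bitsB_pos N hNpos
    have h1 := PySem.Int.mod_nonneg (a := N) (b := bitsB N) (by omega)
    have h2 := PySem.Int.mod_lt (a := N) (b := bitsB N) (by omega)
    omega
  · exact absurd (by rw [bitsB, dif_neg hNpos]) hz

-- while N != 0: N %= bits(N); count += 1
def popLoop (N count : Int) : Int :=
  if _h0 : N ≠ 0 then
    -- Python raises ZeroDivisionError when bits N = 0 (only for negative N, excluded by Pre_); junk branch to stay total
    if hz : bitsB N = 0 then count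
    else popLoop (PySem.Int.mod N (bitsB N)) (count + 1)
  else count
termination_by N.toNat
decreasing_by exact pvModBitsLtB N _h0 hz

def popcount_alt (N : Int) : Int := popLoop N 0

-- ===== PRECONDITION & SPEC =====
-- Pre_ excludes negative N, where the Python A raises ZeroDivisionError (the bit loop counts no set bits there).
def Pre_popcount (N : Int) : Prop := 0 ≤ N
instance (N : Int) : Decidable (Pre_popcount N) := by unfold Pre_popcount; infer_instance
def pvWitness_popcount : Int := (6)
def Spec_popcount (N : Int) (out : Int) : Prop := out = popcount_alt N
instance (N : Int) (out : Int) : Decidable (Spec_popcount N out) := by unfold Spec_popcount; infer_instance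

-- ===== CLAIM (what is proved, stated in full; the proofs are below) =====
def Claim_equal_popcount : Prop := ∀ (N : Int), Dom_popcount N → Pre_popcount N → Spec_popcount N (popcount N)

-- ===== LEMMAS AND PROOFS =====

-- A's accumulator bit-loop computes the accumulator plus B's digit sum
theorem bitLoopA_eq_bitsB (t : Int) (oc : Int) : bitLoopA t oc = oc + bitsB t := by
  by_cases ht : t > 0
  · rw [bitLoopA, dif_pos ht, bitsB, dif_pos ht,
        bitLoopA_eq_bitsB (PySem.Int.floordiv t 2) (oc + PySem.Int.mod t 2)]
    ring
  · rw [bitLoopA, dif_neg ht, bitsB, dif_neg ht, add_zero]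
termination_by t.toNat
decreasing_by exact pvHalfLt t ht

-- loop invariant: the iterative loop equals count plus A's recursive value
theorem popLoop_eq (N : Int) (count : Int) : popLoop N count = count + popcount N := by
  by_cases h0 : N = 0
  · subst h0
    rw [popLoop, popcount]; simp
  · rw [popLoop, dif_pos h0, popcount, dif_neg h0]
    simp only [bitLoopA_eq_bitsB N 0, zero_add]
    by_cases hz : bitsB N = 0
    · rw [dif_pos hz, dif_pos hz]; simp
    · rw [dif_neg hz, dif_neg hz]
      rw [popLoop_eq (PySem.Int.mod N (bitsB N)) (count + 1)]
      ring
termination_by N.toNat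
decreasing_by
  have := pvModBitsLtB N h0 hz
  omega

-- ===== VERDICT (by name: the statement is the Claim_ definition above) =====
theorem popcount_spec : Claim_equal_popcount := by
  intro N _ _
  unfold Spec_popcount popcount_alt
  rw [popLoop_eq N 0, zero_add]
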